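-- pv_equiv track=rewrite | github.com/Jhilam2014/smart_star_tracker_ros | src/stepper_control/src/scripts/irData.py | getIntegerCode
-- ===== SOURCE A (Python) =====
-- def getIntegerCode(rawDATA):
--         binary = "1" # Decoded binary command
--
--         # Covers data to binary
--         for (typ, tme) in rawDATA:
--             if typ == 1: # Ignore the LOW periods, these should be consitant and thus irrelevant
--                 if tme > 1000: # According to NEC protocol a gap of 1687.5 microseconds represents a logical 1 so over 1000 should make a big enough distinction
--                     binary += str(1)
--                 else:
--                     binary += str(0)
--
--         if len(binary) > 34: # Sometimes the binary has two rouge characters on the end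
--             binary = int(str(binary)[:34])
--
--         return int(str(binary),2)
-- ===== SOURCE B (Python) =====
-- def getIntegerCode(rawDATA):
--     # Arithmetic accumulation: no intermediate bit-string, no base-2 parse.
--     result = 1  # the original's leading '1'
--     count = 1   # bits held so far (the leading '1' counts toward the 34-bit cap)
--     for (typ, tme) in rawDATA:
--         if typ == 1:
--             if count < 34:  # keep only the first 34 bits, like the original's truncation
--                 result = result * 2 + (1 if tme > 1000 else 0)
--                 count += 1
--     return result
-- ===== Notes on version B (the rewrite author's own statement) =====
-- stated objective: simpler
-- what changed: B replaces A's build-a-bit-string-then-int(s,2) pipeline by a single arithmetic fold that accumulates result = result*2 + bit directly, counting the leading 1 toward the 34-bit truncation cap, so no string and no parse pass exist.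
import Mathlib
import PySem

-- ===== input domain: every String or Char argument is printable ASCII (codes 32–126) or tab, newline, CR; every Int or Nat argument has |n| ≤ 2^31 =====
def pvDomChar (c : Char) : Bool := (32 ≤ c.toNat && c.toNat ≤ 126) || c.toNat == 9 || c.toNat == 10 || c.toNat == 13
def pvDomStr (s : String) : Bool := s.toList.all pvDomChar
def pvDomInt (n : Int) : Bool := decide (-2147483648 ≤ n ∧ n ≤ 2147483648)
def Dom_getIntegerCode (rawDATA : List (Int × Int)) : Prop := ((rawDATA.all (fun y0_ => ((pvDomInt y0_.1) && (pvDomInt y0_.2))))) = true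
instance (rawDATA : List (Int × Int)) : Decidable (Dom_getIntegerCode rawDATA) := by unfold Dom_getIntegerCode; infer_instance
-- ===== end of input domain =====

-- B replaces A's bit-string + int(s,2) pipeline by one arithmetic fold (result*2 + bit, capped at 34 bits); objective: simpler.

-- ===== PORT A =====
-- Hand port of Python's int(s, 2), exact on the strings this program builds: nonempty, only '0'/'1'
-- characters, leading '1' (no whitespace, sign, prefix or underscores ever reach it).
def pvParseBin2 (cs : List Char) : Int :=
  cs.foldl (fun acc c => 2 * acc + (if c = '1' then 1 else 0)) 0

def getIntegerCode (rawDATA : List (Int × Int)) : Int :=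
  -- binary = "1"; for (typ, tme) in rawDATA: append '1' / '0'
  let binary : List Char :=
    rawDATA.foldl (fun b p =>
      if p.1 = 1 then (if p.2 > 1000 then b ++ ['1'] else b ++ ['0']) else b) ['1']
  -- if len(binary) > 34: binary = int(str(binary)[:34]).  The stored base-10 int is turned back
  -- into a string by the final str(binary); on these digit strings with leading '1' the
  -- int/str round trip returns exactly the sliced string, so it is ported as the slice alone; exact here.
  let binary : List Char :=
    if binary.length > 34 then PySem.List.slice binary none (some 34) else binary
  -- return int(str(binary), 2)
  pvParseBin2 binary

-- ===== PORT B =====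
def getIntegerCode_alt (rawDATA : List (Int × Int)) : Int :=
  (rawDATA.foldl (fun (st : Int × Int) p =>
      if p.1 = 1 then
        if st.2 < 34 then (st.1 * 2 + (if p.2 > 1000 then 1 else 0), st.2 + 1) else st
      else st) (1, 1)).1

-- ===== PRECONDITION & SPEC =====
def Spec_getIntegerCode (rawDATA : List (Int × Int)) (out : Int) : Prop := out = getIntegerCode_alt rawDATA
instance (rawDATA : List (Int × Int)) (out : Int) : Decidable (Spec_getIntegerCode rawDATA out) := by unfold Spec_getIntegerCode; infer_instance

-- ===== CLAIM (what is proved, stated in full; the proofs are below) =====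
def Claim_equal_getIntegerCode : Prop := ∀ (rawDATA : List (Int × Int)), Dom_getIntegerCode rawDATA → Spec_getIntegerCode rawDATA (getIntegerCode rawDATA)

-- ===== LEMMAS AND PROOFS =====

-- parse of an appended bit
theorem pvParseBin2_append (b : List Char) (c : Char) :
    pvParseBin2 (b ++ [c]) = 2 * pvParseBin2 b + (if c = '1' then 1 else 0) := by
  simp [pvParseBin2]

-- loop invariant: B's fold state is (value of the first 34 chars of A's string, min(len, 34))
theorem pv_loop_inv (l : List (Int × Int)) :
    ∀ (b : List Char),
      l.foldl (fun (st : Int × Int) p =>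
          if p.1 = 1 then
            if st.2 < 34 then (st.1 * 2 + (if p.2 > 1000 then 1 else 0), st.2 + 1) else st
          else st) (pvParseBin2 (b.take 34), ((min b.length 34 : Nat) : Int))
      = (pvParseBin2 ((l.foldl (fun b p =>
            if p.1 = 1 then (if p.2 > 1000 then b ++ ['1'] else b ++ ['0']) else b) b).take 34),
         ((min (l.foldl (fun b p =>
            if p.1 = 1 then (if p.2 > 1000 then b ++ ['1'] else b ++ ['0']) else b) b).length 34 : Nat) : Int)) := by
  induction l with
  | nil => intro b; simp
  | cons hd tl ih =>
    intro b
    by_cases h1 : hd.1 = 1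
    · by_cases hlen : b.length < 34
      · -- a bit is appended and counted
        have E : min ((b.length : Int) + 1) 34 = min ((b.length : Int)) 34 + 1 := by omega
        have M : min ((b.length : Int)) 34 = (b.length : Int) := by omega
        by_cases h2 : hd.2 > 1000
        · simpa [h1, h2, hlen, pvParseBin2_append,
            List.take_of_length_le (show b.length ≤ 34 by omega),
            List.take_of_length_le (show (b ++ ['1']).length ≤ 34 by simp; omega),
            E, M, mul_comm (2 : Int)] using ih (b ++ ['1'])
        · simpa [h1, h2, hlen, pvParseBin2_append,
            List.take_of_length_le (show b.length ≤ 34 by omega),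
            List.take_of_length_le (show (b ++ ['0']).length ≤ 34 by simp; omega),
            E, M, mul_comm (2 : Int)] using ih (b ++ ['0'])
      · -- already 34 bits held: both sides keep their value
        have E : min ((b.length : Int) + 1) 34 = min ((b.length : Int)) 34 := by omega
        by_cases h2 : hd.2 > 1000
        · simpa [h1, h2, hlen,
            List.take_append_of_le_length (show 34 ≤ b.length by omega), E] using ih (b ++ ['1'])
        · simpa [h1, h2, hlen,
            List.take_append_of_le_length (show 34 ≤ b.length by omega), E] using ih (b ++ ['0'])
    · simpa [h1] using ih b

-- ===== VERDICT (by name: the statement is the Claim_ definition above) =====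
theorem getIntegerCode_spec : Claim_equal_getIntegerCode := by
  intro rawDATA _
  unfold Spec_getIntegerCode getIntegerCode getIntegerCode_alt
  dsimp only
  have h := pv_loop_inv rawDATA ['1']
  rw [show pvParseBin2 ((['1'] : List Char).take 34) = 1 from by decide,
      show ((min (['1'] : List Char).length 34 : Nat) : Int) = 1 from by decide] at h
  set bfin := rawDATA.foldl (fun b p =>
      if p.1 = 1 then (if p.2 > 1000 then b ++ ['1'] else b ++ ['0']) else b) (['1'] : List Char) with hb
  rw [h]
  by_cases hlen : bfin.length > 34
  · rw [if_pos hlen,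
      show PySem.List.slice bfin none (some 34) = bfin.take (34 : Int).toNat from
        PySem.List.slice_to _ (by norm_num)]
    rfl
  · rw [if_neg hlen]
    simp [List.take_of_length_le (by omega : bfin.length ≤ 34)]
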